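-- pv_equiv track=rewrite | github.com/ChenZhuangGeng/L_S_VNS_Floorplanning | EDA_Last/src/function/CzgFunction.py | subsets
-- ===== SOURCE A (Python) =====
-- import random, itertools, linecache
--
-- def subsets(nums):
--     if len(nums) == 2:
--         return tuple(nums)
--     res = []
--     for i in range(len(nums) + 1):
--         for tmp in itertools.combinations(nums, i):
--             res.append(tmp)
--     index_list = []
--     for i in range(len(res) - 1):
--         if len(res[i]) != 0 and len(res[i]) != 1:
--             index_list.append(i)
--     new_res = []
--     for i in index_list:
--         new_res.append(res[i])
--     return new_res
-- ===== SOURCE B (Python) =====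
-- def _combos(xs, r):
--     if r == 0:
--         return [()]
--     if len(xs) < r:
--         return []
--     rest = xs[1:]
--     return [(xs[0],) + c for c in _combos(rest, r - 1)] + _combos(rest, r)
--
--
-- def subsets(nums):
--     res = []
--     for r in range(2, len(nums)):
--         res.extend(_combos(nums, r))
--     return res
-- ===== Notes on version B (the rewrite author's own statement) =====
-- stated objective: simpler
-- what changed: B generates only the needed sizes 2..n-1 directly with a small recursive combination generator, instead of A's build-all-sizes list followed by an index-table pass that filters out sizes 0 and 1 and the trailing full set.
-- outside the precondition, e.g. on subsets([1, 2]): A returns [1, 2], B returns []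
import Mathlib
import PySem

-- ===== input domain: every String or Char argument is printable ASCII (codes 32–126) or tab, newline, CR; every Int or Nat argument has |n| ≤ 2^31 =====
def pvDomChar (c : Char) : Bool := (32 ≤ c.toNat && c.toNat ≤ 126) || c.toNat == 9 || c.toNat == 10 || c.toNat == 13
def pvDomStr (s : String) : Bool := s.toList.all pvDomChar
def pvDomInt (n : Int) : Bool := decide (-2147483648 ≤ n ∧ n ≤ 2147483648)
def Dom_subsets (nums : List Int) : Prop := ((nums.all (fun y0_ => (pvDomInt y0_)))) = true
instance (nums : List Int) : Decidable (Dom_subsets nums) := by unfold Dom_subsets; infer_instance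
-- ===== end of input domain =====

-- B is a simpler decomposition: it generates only sizes 2..n-1 directly instead of A's
-- build-all-sizes list plus an index-table filtering pass; return-value equivalence on length ≠ 2.

-- ===== PORT A =====
-- itertools.combinations → PySem.List.combinations (CPython order)
def subsets (nums : List Int) : List (List Int) :=
  -- Python A's `if len(nums) == 2: return tuple(nums)` returns a tuple of ints, not a value of
  -- this return type; Pre_subsets excludes length-2 inputs, so that branch is not ported.
  let res := (PySem.List.pyRange 0 ((nums.length : Int) + 1) 1).foldl
      (fun acc i => acc ++ PySem.List.combinations nums i.toNat) []
  let indexList := (PySem.List.pyRange 0 ((res.length : Int) - 1) 1).foldl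
      (fun acc i =>
        if (PySem.List.pyGetD res i []).length ≠ 0 ∧ (PySem.List.pyGetD res i []).length ≠ 1
        then acc ++ [i] else acc) []
  indexList.foldl (fun acc i => acc ++ [PySem.List.pyGetD res i []]) []

-- ===== PORT B =====
-- transliteration of Source B's _combos
def pyCombos : List Int → Nat → List (List Int)
  | _, 0 => [[]]
  | [], _ + 1 => []
  | x :: rest, r + 1 =>
    if (x :: rest).length < r + 1 then []
    else (pyCombos rest r).map (x :: ·) ++ pyCombos rest (r + 1)

def subsets_alt (nums : List Int) : List (List Int) :=
  (PySem.List.pyRange 2 (nums.length : Int) 1).foldl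
    (fun acc r => acc ++ pyCombos nums r.toNat) []

-- ===== PRECONDITION & SPEC =====
-- Pre_ excludes exactly the length-2 lists: there Python A returns tuple(nums), a tuple of ints,
-- which is not a value of the declared return type (a list of tuples).
def Pre_subsets (nums : List Int) : Prop := nums.length ≠ 2
instance (nums : List Int) : Decidable (Pre_subsets nums) := by unfold Pre_subsets; infer_instance
def pvWitness_subsets : List Int := [1, 2, 3]

def Spec_subsets (nums : List Int) (out : List (List Int)) : Prop := out = subsets_alt nums
instance (nums : List Int) (out : List (List Int)) : Decidable (Spec_subsets nums out) := by unfold Spec_subsets; infer_instance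

-- ===== CLAIM (what is proved, stated in full; the proofs are below) =====
def Claim_equal_subsets : Prop := ∀ (nums : List Int), Dom_subsets nums → Pre_subsets nums → Spec_subsets nums (subsets nums)

-- ===== LEMMAS AND PROOFS =====

theorem pyCombos_eq_combinations (xs : List Int) (r : Nat) :
    pyCombos xs r = PySem.List.combinations xs r := by
  induction xs generalizing r with
  | nil =>
    cases r with
    | zero => simp [pyCombos, PySem.List.combinations_zero]
    | succ r => simp [pyCombos, PySem.List.combinations_nil_succ]
  | cons x rest ih =>
    cases r with
    | zero => simp [pyCombos, PySem.List.combinations_zero]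
    | succ r =>
      rw [pyCombos]
      split_ifs with h
      · exact (PySem.List.combinations_eq_nil_of_length_lt _ h).symm
      · rw [PySem.List.combinations_cons_succ, ih, ih]

theorem pyGetD_append_left (l1 l2 : List (List Int)) (i : Int) (d : List Int)
    (h0 : 0 ≤ i) (h1 : i < (l1.length : Int)) :
    PySem.List.pyGetD (l1 ++ l2) i d = PySem.List.pyGetD l1 i d := by
  rw [PySem.List.pyGetD_eq_getElem (l1 ++ l2) d h0 (by simp; omega),
      PySem.List.pyGetD_eq_getElem l1 d h0 h1]
  exact List.getElem_append_left (by omega)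

theorem subsets_alt_eq_flatMap (nums : List Int) :
    subsets_alt nums =
      (PySem.List.pyRange 2 (nums.length : Int) 1).flatMap
        (fun r => PySem.List.combinations nums r.toNat) := by
  unfold subsets_alt
  rw [PySem.List.foldl_append_eq_flatMap]
  simp [pyCombos_eq_combinations]

theorem length_of_mem_flatMap_combos (nums : List Int) (c : List Int)
    (h : c ∈ (PySem.List.pyRange 2 (nums.length : Int) 1).flatMap
        (fun r => PySem.List.combinations nums r.toNat)) :
    2 ≤ c.length := by
  rcases List.mem_flatMap.mp h with ⟨r, hr, hc⟩
  have hr2 : 2 ≤ r ∧ r < (nums.length : Int) := (PySem.List.mem_pyRange_one).mp hr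
  have := PySem.List.length_of_mem_combinations hc
  omega

theorem filter_map_singleton (nums : List Int) (p : List Int → Prop) [DecidablePred p]
    (h : ∀ x : Int, ¬ p [x]) :
    (nums.map (fun x => [x])).filter (fun c => decide (p c)) = [] := by
  rw [List.filter_eq_nil_iff]
  intro c hc
  rcases List.mem_map.mp hc with ⟨x, _, rfl⟩
  simpa using h x

theorem stage2 (trunc : List (List Int)) (last : List Int) (p : List Int → Prop)
    [DecidablePred p] :
    (((PySem.List.pyRange 0 (((trunc ++ [last]).length : Int) - 1) 1).foldl
        (fun acc i => if p (PySem.List.pyGetD (trunc ++ [last]) i []) then acc ++ [i] else acc)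
        []).foldl
      (fun acc i => acc ++ [PySem.List.pyGetD (trunc ++ [last]) i []]) []) =
    trunc.filter (fun c => decide (p c)) := by
  have hlen : (((trunc ++ [last]).length : Int) - 1) = (trunc.length : Int) := by
    simp
  rw [hlen]
  rw [PySem.List.foldl_congr_mem _ _
      (fun acc i => if p (PySem.List.pyGetD trunc i []) then acc ++ [i] else acc) _
      (by
        intro acc i hi
        have hb := PySem.List.mem_pyRange_one.mp hi
        rw [pyGetD_append_left trunc [last] i [] hb.1 hb.2])]
  rw [PySem.List.foldl_append_ite (fun i => p (PySem.List.pyGetD trunc i [])) (fun i => i)]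
  simp only [List.nil_append, List.map_id_fun', id]
  rw [PySem.List.foldl_congr_mem _ _
      (fun acc i => acc ++ [PySem.List.pyGetD trunc i []]) _
      (by
        intro acc i hi
        have hb := PySem.List.mem_pyRange_one.mp (List.mem_filter.mp hi).1
        rw [pyGetD_append_left trunc [last] i [] hb.1 hb.2])]
  rw [PySem.List.foldl_append_singleton_eq_map]
  rw [show (fun i => decide (p (PySem.List.pyGetD trunc i []))) =
        ((fun c => decide (p c)) ∘ (fun i => PySem.List.pyGetD trunc i [])) from rfl]
  rw [← List.filter_map, PySem.List.map_pyGetD_pyRange_zero']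
  simp

theorem subsets_spec_main (nums : List Int) : subsets nums = subsets_alt nums := by
  by_cases hn : 2 ≤ nums.length
  · -- general case: n ≥ 2
    set n : Nat := nums.length with hndef
    have h01 : PySem.List.pyRange 0 2 1 = [0, 1] := by decide
    have hsplit : PySem.List.pyRange 0 ((n : Int) + 1) 1 =
        ([0, 1] ++ PySem.List.pyRange 2 (n : Int) 1) ++ [(n : Int)] := by
      rw [PySem.List.pyRange_one_append 0 (n : Int) ((n : Int) + 1) (by omega) (by omega),
          PySem.List.pyRange_one_append 0 2 (n : Int) (by omega) (by omega),
          h01, PySem.List.pyRange_one_singleton]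
    have hres : (PySem.List.pyRange 0 ((n : Int) + 1) 1).foldl
        (fun acc i => acc ++ PySem.List.combinations nums i.toNat) [] =
        ([] :: (nums.map (fun x => [x]) ++
          (PySem.List.pyRange 2 (n : Int) 1).flatMap
            (fun r => PySem.List.combinations nums r.toNat))) ++ [nums] := by
      rw [PySem.List.foldl_append_eq_flatMap, hsplit]
      simp only [List.flatMap_append, List.flatMap_cons, List.flatMap_nil, List.nil_append]
      have h0 : PySem.List.combinations nums (Int.toNat 0) = [[]] :=
        PySem.List.combinations_zero nums
      have h1' : PySem.List.combinations nums (Int.toNat 1) =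
          nums.map (fun x => [x]) := PySem.List.combinations_one nums
      have hself : PySem.List.combinations nums (Int.toNat (n : Int)) = [nums] := by
        rw [Int.toNat_natCast, hndef]
        exact PySem.List.combinations_length_self nums
      rw [h0, h1', hself]
      simp
    simp only [subsets]
    rw [hres]
    rw [stage2 _ nums (fun c => c.length ≠ 0 ∧ c.length ≠ 1)]
    rw [subsets_alt_eq_flatMap]
    simp only [List.filter_cons, List.filter_append]
    rw [filter_map_singleton nums _ (by intro x; simp)]
    rw [List.filter_eq_self.mpr (by
      intro c hc
      have := length_of_mem_flatMap_combos nums c hc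
      simp only [ne_eq, decide_eq_true_eq]
      constructor <;> omega)]
    rw [hndef]
    simp
  · -- n = 0 or n = 1
    match nums, hn with
    | [], _ => decide
    | [a], _ =>
      have halt : subsets_alt [a] = [] := by
        simp [subsets_alt]
      have hres1 : (PySem.List.pyRange 0 (([a].length : Int) + 1) 1).foldl
          (fun acc i => acc ++ PySem.List.combinations [a] i.toNat) [] = [[], [a]] := by
        rw [show (([a].length : Int) + 1) = 2 from by norm_num,
            show PySem.List.pyRange 0 2 1 = [0, 1] from by decide]
        simp [List.foldl, PySem.List.combinations_zero, PySem.List.combinations_one]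
      simp only [subsets]
      rw [hres1, halt]
      rw [show ((([[], [a]] : List (List Int)).length : Int) - 1) = 1 from by norm_num,
          show PySem.List.pyRange 0 1 1 = [0] from by decide]
      simp [PySem.List.pyGetD_zero_cons]
    | a :: b :: t, hn => exact absurd (by simp) hn

-- ===== VERDICT (by name: the statement is the Claim_ definition above) =====
theorem subsets_spec : Claim_equal_subsets := by
  intro nums _ _
  unfold Spec_subsets
  exact subsets_spec_main nums
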